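-- pv_equiv track=rewrite | github.com/brickfrog/resorter.py | resorter_py/ranker.py | assign_levels
-- ===== SOURCE A (Python) =====
-- from typing import Dict, List, Optional, Tuple, Union, Sequence, Any, Mapping, TYPE_CHECKING
--
-- def assign_levels(
--     sorted_ranks: Mapping[Any, float], num_levels: int
-- ) -> Dict[Union[int, str], int]:
--     total_items = len(sorted_ranks)
--     if total_items == 0:
--         return {}
--     items_per_level = total_items // num_levels
--     remainder = total_items % num_levels
--     level_sizes = [
--         items_per_level + (1 if idx < remainder else 0) for idx in range(num_levels)
--     ]
--     levels = {}
--     current_level = num_levels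
--     count = 0
--     size_idx = 0
--     for key, _ in sorted_ranks.items():
--         levels[key] = current_level
--         count += 1
--         if count >= level_sizes[size_idx]:
--             size_idx += 1
--             current_level -= 1
--             count = 0
--     return levels
-- ===== SOURCE B (Python) =====
-- def assign_levels(sorted_ranks, num_levels):
--     total = len(sorted_ranks)
--     if total == 0:
--         return {}
--     per, rem = divmod(total, num_levels)
--     cut = rem * (per + 1)
--     return {
--         key: num_levels - (j // (per + 1) if j < cut else rem + (j - cut) // per)
--         for j, key in enumerate(sorted_ranks)
--     }
-- ===== Notes on version B (the rewrite author's own statement) =====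
-- stated objective: alternative
-- what changed: A walks the items with mutable bucket state (count/size_idx/current_level) after materialising a level_sizes list; B builds no bucket sizes at all and computes each item's level directly from its index by a closed-form formula (j//(per+1) in the first rem*(per+1) positions, else rem+(j-cut)//per).
import Mathlib
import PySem

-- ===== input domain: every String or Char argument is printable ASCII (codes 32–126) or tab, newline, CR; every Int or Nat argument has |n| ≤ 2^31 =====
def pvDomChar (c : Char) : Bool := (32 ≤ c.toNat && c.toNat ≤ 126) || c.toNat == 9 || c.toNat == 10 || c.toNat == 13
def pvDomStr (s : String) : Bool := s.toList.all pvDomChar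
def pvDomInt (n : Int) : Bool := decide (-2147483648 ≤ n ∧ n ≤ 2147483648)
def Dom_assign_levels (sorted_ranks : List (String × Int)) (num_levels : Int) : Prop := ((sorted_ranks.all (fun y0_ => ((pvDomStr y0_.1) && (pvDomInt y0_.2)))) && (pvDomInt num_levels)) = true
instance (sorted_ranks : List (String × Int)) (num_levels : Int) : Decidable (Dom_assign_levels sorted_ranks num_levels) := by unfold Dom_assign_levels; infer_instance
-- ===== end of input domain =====

-- B drops A's stateful pass and bucket-size list entirely: each item's level is computed directly
-- from its index by a closed-form formula (alternative algorithm, same order of cost).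


-- ===== PORT A =====
-- the indexing 'level_sizes[size_idx]' is ported as pyGet? ….getD 0; inside Pre_ the index is
-- always in range, so the default is never read (out of range Python raises IndexError, excluded by Pre_)
def assign_levels (sorted_ranks : List (String × Int)) (num_levels : Int) : List (String × Int) :=
  let total_items : Int := sorted_ranks.length
  if total_items = 0 then []
  else
    let items_per_level := PySem.Int.floordiv total_items num_levels
    let remainder := PySem.Int.mod total_items num_levels
    let level_sizes := (PySem.List.pyRange 0 num_levels).map
      (fun idx => items_per_level + (if idx < remainder then 1 else 0))
    let st := sorted_ranks.foldl
      (fun (st : PySem.Dict String Int × Int × Int × Int) kv =>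
        if st.2.2.1 + 1 ≥ (PySem.List.pyGet? level_sizes st.2.2.2).getD 0 then
          (st.1.insert kv.1 st.2.1, st.2.1 - 1, 0, st.2.2.2 + 1)
        else (st.1.insert kv.1 st.2.1, st.2.1, st.2.2.1 + 1, st.2.2.2))
      (PySem.Dict.empty, num_levels, 0, 0)
    st.1.items

-- ===== PORT B =====
-- Python's '(j - cut) // per' is only evaluated when j ≥ cut (and then per ≥ 1 inside Pre_);
-- the dict comprehension over enumerate(...) is PySem.Dict.ofList of the mapped pair list
def assign_levels_alt (sorted_ranks : List (String × Int)) (num_levels : Int) : List (String × Int) :=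
  let total : Int := sorted_ranks.length
  if total = 0 then []
  else
    match PySem.Int.divmod? total num_levels with
    | none => []   -- ZeroDivisionError in Python, excluded by Pre_
    | some (per, rem) =>
      let cut := rem * (per + 1)
      (PySem.Dict.ofList ((PySem.List.enumerate sorted_ranks).map
        (fun p => (p.2.1, num_levels -
          (if p.1 < cut then PySem.Int.floordiv p.1 (per + 1)
           else rem + PySem.Int.floordiv (p.1 - cut) per))))).items

-- ===== PRECONDITION & SPEC =====
-- Pre_ excludes (a) nonempty input with num_levels ≤ 0, where A raises (ZeroDivisionError at
-- num_levels == 0, IndexError for negative num_levels), and (b) association lists with duplicate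
-- keys, which a Python dict argument cannot represent.
def Pre_assign_levels (sorted_ranks : List (String × Int)) (num_levels : Int) : Prop :=
  (sorted_ranks.map Prod.fst).Nodup ∧ (sorted_ranks = [] ∨ 1 ≤ num_levels)
instance (sorted_ranks : List (String × Int)) (num_levels : Int) : Decidable (Pre_assign_levels sorted_ranks num_levels) := by unfold Pre_assign_levels; infer_instance
def pvWitness_assign_levels : (List (String × Int)) × Int := ([("a", 1), ("b", 2), ("c", 3)], 2)

def Spec_assign_levels (sorted_ranks : List (String × Int)) (num_levels : Int) (out : List (String × Int)) : Prop := out = assign_levels_alt sorted_ranks num_levels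
instance (sorted_ranks : List (String × Int)) (num_levels : Int) (out : List (String × Int)) : Decidable (Spec_assign_levels sorted_ranks num_levels out) := by unfold Spec_assign_levels; infer_instance

-- ===== CLAIM (what is proved, stated in full; the proofs are below) =====
def Claim_equal_assign_levels : Prop := ∀ (sorted_ranks : List (String × Int)) (num_levels : Int), Dom_assign_levels sorted_ranks num_levels → Pre_assign_levels sorted_ranks num_levels → Spec_assign_levels sorted_ranks num_levels (assign_levels sorted_ranks num_levels)

-- ===== LEMMAS AND PROOFS =====

-- the label sequence A hands out: for each bucket size s (front of the list), its level label cl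
-- repeated s.toNat times, the next bucket one label lower
def pvLab (cl : Int) : List Int → List Int
  | [] => []
  | s :: t => List.replicate s.toNat cl ++ pvLab (cl - 1) t

-- A's per-item counter dynamics, abstracted to the labels it hands out to the next n items
def pvG (cl count : Int) (rest : List Int) : Nat → List Int
  | 0 => []
  | n + 1 =>
    if count + 1 ≥ rest.head?.getD 0 then
      cl :: pvG (cl - 1) 0 rest.tail n
    else
      cl :: pvG cl (count + 1) rest n

theorem pv_foldA (sizes : List Int) :
    ∀ (ks : List (String × Int)) (d : PySem.Dict String Int) (cl count : Int) (j : Nat),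
    (ks.map Prod.fst).Nodup → (∀ kv ∈ ks, d.contains kv.1 = false) →
    ((ks.foldl
      (fun (st : PySem.Dict String Int × Int × Int × Int) kv =>
        if st.2.2.1 + 1 ≥ (PySem.List.pyGet? sizes st.2.2.2).getD 0 then
          (st.1.insert kv.1 st.2.1, st.2.1 - 1, 0, st.2.2.2 + 1)
        else (st.1.insert kv.1 st.2.1, st.2.1, st.2.2.1 + 1, st.2.2.2))
      (d, cl, count, (j : Int))).1).items
    = d.items ++ (ks.map Prod.fst).zip (pvG cl count (sizes.drop j) ks.length) := by
  intro ks
  induction ks with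
  | nil => intro d cl count j _ _; simp [pvG]
  | cons kv t ih =>
    intro d cl count j hnd hfresh
    have hfresh1 : d.contains kv.1 = false := hfresh kv (by simp)
    have hitems : (d.insert kv.1 cl).items = d.items ++ [(kv.1, cl)] :=
      PySem.Dict.items_insert_of_not_contains d cl hfresh1
    have hfresh' : ∀ x ∈ t, (d.insert kv.1 cl).contains x.1 = false := by
      intro x hx
      rw [PySem.Dict.contains_insert]
      have hne : x.1 ≠ kv.1 := by
        simp only [List.map_cons, List.nodup_cons] at hnd
        intro he; exact hnd.1 (he ▸ List.mem_map_of_mem hx)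
      simp [hne, hfresh x (by simp [hx])]
    have hnd' : (t.map Prod.fst).Nodup := by
      simp only [List.map_cons, List.nodup_cons] at hnd; exact hnd.2
    have hget : (PySem.List.pyGet? sizes (j : Int)).getD 0 = (sizes.drop j).head?.getD 0 := by
      rw [PySem.List.pyGet?_natCast, List.head?_drop]
    simp only [List.foldl_cons, List.map_cons, List.length_cons, hget]
    by_cases hcond : count + 1 ≥ (sizes.drop j).head?.getD 0
    · rw [if_pos hcond]
      rw [show (j : Int) + 1 = ((j + 1 : Nat) : Int) from by push_cast; ring]
      rw [ih (d.insert kv.1 cl) (cl - 1) 0 (j + 1) hnd' hfresh']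
      simp only [pvG, if_pos hcond, hitems, ← List.tail_drop]
      simp [List.zip_cons_cons]
    · rw [if_neg hcond]
      rw [ih (d.insert kv.1 cl) cl (count + 1) j hnd' hfresh']
      simp only [pvG, if_neg hcond, hitems]
      simp [List.zip_cons_cons]

theorem pv_lab_nil (t : List Int) (cl : Int) (h : ∀ s ∈ t, s ≤ 0) : pvLab cl t = [] := by
  induction t generalizing cl with
  | nil => rfl
  | cons s t ih =>
    have hs : s.toNat = 0 := by have := h s (by simp); omega
    simp [pvLab, hs, ih (cl - 1) (fun x hx => h x (by simp [hx]))]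

theorem pv_bucket : ∀ (k : Nat) (cl count s : Int) (rest : List Int) (m : Nat),
    1 ≤ k → count + k = s →
    pvG cl count (s :: rest) (k + m) = List.replicate k cl ++ pvG (cl - 1) 0 rest m := by
  intro k
  induction k with
  | zero => omega
  | succ k ih =>
    intro cl count s rest m _ hsum
    match k, ih with
    | 0, _ =>
      rw [show 0 + 1 + m = m + 1 from by omega]
      simp only [pvG, List.head?_cons, Option.getD_some, List.tail_cons]
      rw [if_pos (by omega)]
      simp
    | k + 1, ih =>
      rw [show k + 1 + 1 + m = (k + 1 + m) + 1 from by omega]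
      simp only [pvG, List.head?_cons, Option.getD_some, List.tail_cons]
      rw [if_neg (by omega)]
      rw [ih (cl) (count + 1) s rest m (by omega) (by omega)]
      simp [List.replicate_succ]

theorem pv_flat : ∀ (ss0 rest : List Int) (cl : Int),
    (∀ s ∈ ss0, 0 < s) → (∀ s ∈ rest, s ≤ 0) →
    pvG cl 0 (ss0 ++ rest) ((ss0.map Int.toNat).sum) = pvLab cl (ss0 ++ rest) := by
  intro ss0
  induction ss0 with
  | nil =>
    intro rest cl _ hrest
    simp [pvG, pv_lab_nil rest cl hrest]
  | cons s t ih =>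
    intro rest cl hpos hrest
    have hs : 0 < s := hpos s (by simp)
    simp only [List.map_cons, List.sum_cons, List.cons_append]
    rw [pv_bucket s.toNat cl 0 s (t ++ rest) ((t.map Int.toNat).sum) (by omega) (by omega)]
    rw [ih rest (cl - 1) (fun x hx => hpos x (by simp [hx])) hrest]
    simp [pvLab]

-- pvLab splits along an append of the size list, shifting the label by the prefix length
theorem pv_lab_append (s1 s2 : List Int) : ∀ cl : Int,
    pvLab cl (s1 ++ s2) = pvLab cl s1 ++ pvLab (cl - s1.length) s2 := by
  induction s1 with
  | nil => intro cl; simp [pvLab]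
  | cons s t ih =>
    intro cl
    simp only [List.cons_append, pvLab, ih (cl - 1), List.length_cons, List.append_assoc]
    congr 3
    push_cast; ring

-- pvLab over r equal buckets of positive size s is the closed-form index map
theorem pv_lab_replicate (s : Int) (hs : 0 < s) : ∀ (r : Nat) (cl : Int),
    pvLab cl (List.replicate r s)
      = (List.range (r * s.toNat)).map (fun j => cl - ((j / s.toNat : Nat) : Int)) := by
  intro r
  induction r with
  | zero => intro cl; simp [pvLab]
  | succ r ih =>
    intro cl
    have hsn : 0 < s.toNat := by omega
    rw [List.replicate_succ]
    simp only [pvLab, ih (cl - 1)]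
    rw [show (r + 1) * s.toNat = s.toNat + r * s.toNat from by ring, List.range_add,
      List.map_append, List.map_map]
    congr 1
    · refine List.ext_getElem (by simp) ?_
      intro k hk1 hk2
      have hk : k < s.toNat := by simpa using hk1
      rw [List.getElem_replicate, List.getElem_map, List.getElem_range,
        Nat.div_eq_of_lt hk]
      simp
    · refine List.map_congr_left ?_
      intro j hj
      simp only [Function.comp]
      rw [Nat.add_div_left j hsn]
      push_cast; ring

-- B's mapped enumerate list is the keys zipped with the index→label map
theorem pv_enum_zip (xs : List (String × Int)) (h : Int → Int) :
    (PySem.List.enumerate xs).map (fun p => (p.2.1, h p.1))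
      = (xs.map Prod.fst).zip ((List.range xs.length).map (fun (j : Nat) => h (j : Int))) := by
  apply List.ext_getElem
  · simp [PySem.List.length_enumerate]
  · intro k h1 h2
    have hk : k < xs.length := by
      simpa [PySem.List.length_enumerate] using h1
    rw [List.getElem_map, PySem.List.getElem_enumerate,
      List.getElem_zip, List.getElem_map, List.getElem_map, List.getElem_range]
    simp

-- ===== VERDICT (by name: the statement is the Claim_ definition above) =====
theorem assign_levels_spec : Claim_equal_assign_levels := by
  intro sr nl _ hpre
  obtain ⟨hnd, hcase⟩ := hpre
  unfold Spec_assign_levels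
  by_cases hemp : sr = []
  · subst hemp; rfl
  · have hnl : 1 ≤ nl := hcase.resolve_left hemp
    have hlen : 1 ≤ (sr.length : Int) := by
      have : sr.length ≠ 0 := by simpa [List.length_eq_zero_iff] using hemp
      omega
    have htot0 : ((sr.length : Int)) ≠ 0 := by omega
    have hnl0 : nl ≠ 0 := by omega
    set total : Int := (sr.length : Int) with htotdef
    set per : Int := PySem.Int.floordiv total nl with hperdef
    set rem : Int := PySem.Int.mod total nl with hremdef
    set sizes : List Int :=
      (PySem.List.pyRange 0 nl).map (fun idx => per + (if idx < rem then 1 else 0)) with hsizesdef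
    set keys : List String := sr.map Prod.fst with hkeysdef
    have hper0 : 0 ≤ per := by
      rw [hperdef, PySem.Int.floordiv_eq_ediv_of_pos (by omega)]
      exact Int.ediv_nonneg (by omega) (by omega)
    have hrem0 : 0 ≤ rem := PySem.Int.mod_nonneg total (by omega)
    have hremlt : rem < nl := PySem.Int.mod_lt total (by omega)
    have hid : per * nl + rem = total := PySem.Int.floordiv_mul_add_mod total nl
    set r : Nat := rem.toNat with hrdef
    set m : Nat := (nl - rem).toNat with hmdef
    set p1 : Nat := (per + 1).toNat with hp1def
    set p : Nat := per.toNat with hpdef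
    have hrcast : (r : Int) = rem := by rw [hrdef, Int.toNat_of_nonneg hrem0]
    have hmcast : (m : Int) = nl - rem := by rw [hmdef, Int.toNat_of_nonneg (by omega)]
    have hp1cast : (p1 : Int) = per + 1 := by rw [hp1def, Int.toNat_of_nonneg (by omega)]
    have hpcast : (p : Int) = per := by rw [hpdef, Int.toNat_of_nonneg hper0]
    -- the size list is r buckets of per+1 followed by m buckets of per
    have hsizes : sizes = List.replicate r (per + 1) ++ List.replicate m per := by
      rw [hsizesdef, PySem.List.pyRange_one_append 0 rem nl hrem0 (le_of_lt hremlt), List.map_append]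
      congr 1
      · rw [List.map_congr_left (fun i hi => ?_), List.map_const',
          PySem.List.length_pyRange_one, sub_zero]
        rw [PySem.List.mem_pyRange_one] at hi
        rw [if_pos hi.2]
      · rw [List.map_congr_left (fun i hi => ?_), List.map_const',
          PySem.List.length_pyRange_one]
        rw [PySem.List.mem_pyRange_one] at hi
        rw [if_neg (by omega)]; ring
    -- the total number of items fills the buckets exactly
    have hcount : r * p1 + m * p = sr.length := by
      have : ((r * p1 + m * p : Nat) : Int) = total := by
        push_cast
        rw [hrcast, hmcast, hp1cast, hpcast]
        calc rem * (per + 1) + (nl - rem) * per = per * nl + rem := by ring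
          _ = total := hid
      omega
    -- A's side: the stateful fold hands out exactly the labels pvG computes
    have hA : assign_levels sr nl = keys.zip (pvG nl 0 sizes sr.length) := by
      simp only [assign_levels]
      rw [if_neg htot0]
      have := pv_foldA sizes sr PySem.Dict.empty nl 0 0 hnd
        (fun kv _ => PySem.Dict.contains_empty kv.1)
      simp only [Nat.cast_zero, List.drop_zero, PySem.Dict.empty, List.nil_append] at this
      exact this
    -- the labels pvG hands out are the flattened bucket labels pvLab
    have hG : pvG nl 0 sizes sr.length = pvLab nl sizes := by
      rcases eq_or_lt_of_le hper0 with hper | hper1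
      · -- per = 0: the first r buckets (size 1) hold everything, the rest are empty
        have := pv_flat (List.replicate r (per + 1)) (List.replicate m per) nl
          (by intro s hs; rw [List.eq_of_mem_replicate hs]; omega)
          (by intro s hs; rw [List.eq_of_mem_replicate hs]; omega)
        rw [hsizes, ← this]
        congr 1
        simp only [List.map_replicate, List.sum_replicate, smul_eq_mul]
        have h1 : r * (per + 1).toNat = r * p1 := by rw [hp1def]
        have h2 : m * per.toNat = m * p := by rw [hpdef]
        have hmp : m * p = 0 := by
          have hp0 : p = 0 := by omega
          simp [hp0]
        omega
      · -- per >= 1: every bucket is positive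
        have hpos : ∀ s ∈ sizes, 0 < s := by
          intro s hs
          rw [hsizes] at hs
          rcases List.mem_append.1 hs with h | h <;>
            rw [List.eq_of_mem_replicate h] <;> omega
        have := pv_flat sizes [] nl hpos (by simp)
        rw [List.append_nil] at this
        rw [← this]
        congr 1
        rw [hsizes]
        simp only [List.map_append, List.sum_append, List.map_replicate,
          List.sum_replicate, smul_eq_mul]
        have h1 : r * (per + 1).toNat = r * p1 := by rw [hp1def]
        have h2 : m * per.toNat = m * p := by rw [hpdef]
        omega
    -- the flattened bucket labels are B's closed-form index map
    have hlab : pvLab nl sizes = (List.range sr.length).map (fun (j : Nat) => nl -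
        (if (j : Int) < rem * (per + 1) then PySem.Int.floordiv (j : Int) (per + 1)
         else rem + PySem.Int.floordiv ((j : Int) - rem * (per + 1)) per)) := by
      have hcut : ((r * p1 : Nat) : Int) = rem * (per + 1) := by
        push_cast; rw [hrcast, hp1cast]
      rw [hsizes, pv_lab_append, pv_lab_replicate (per + 1) (by omega) r nl,
        List.length_replicate]
      rcases eq_or_lt_of_le hper0 with hper | hper1
      · -- per = 0: second segment empty, every index is in the first regime
        have hmp : m * p = 0 := by
          have : p = 0 := by omega
          simp [this]
        have hr_len : r * p1 = sr.length := by omega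
        rw [pv_lab_nil _ _ (by intro s hs; rw [List.eq_of_mem_replicate hs]; omega),
          List.append_nil, hr_len]
        refine List.map_congr_left ?_
        intro j hj
        rw [List.mem_range] at hj
        have hjlt : (j : Int) < rem * (per + 1) := by
          rw [← hcut]; exact_mod_cast (by omega : j < r * p1)
        rw [if_pos hjlt, ← hp1cast, PySem.Int.floordiv_natCast]
        rw [Int.toNat_natCast]
      · -- per >= 1: split the index range at the cut
        rw [pv_lab_replicate per (by omega) m (nl - r),
          ← hcount, List.range_add, List.map_append, List.map_map]
        congr 1
        · refine List.map_congr_left ?_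
          intro j hj
          rw [List.mem_range] at hj
          have hjlt : (j : Int) < rem * (per + 1) := by
            rw [← hcut]; exact_mod_cast hj
          rw [if_pos hjlt, ← hp1cast, PySem.Int.floordiv_natCast]
          simp
        · refine List.map_congr_left ?_
          intro j hj
          rw [List.mem_range] at hj
          simp only [Function.comp]
          have hge : ¬ ((r * p1 + j : Nat) : Int) < rem * (per + 1) := by
            rw [← hcut]; push_cast; omega
          rw [if_neg hge]
          have hdiff : ((r * p1 + j : Nat) : Int) - rem * (per + 1) = ((j : Nat) : Int) := by
            rw [← hcut]; push_cast; ring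
          rw [hdiff, ← hpcast, PySem.Int.floordiv_natCast, hrcast, Int.toNat_natCast]
          ring
    -- B's side
    have hB : assign_levels_alt sr nl = keys.zip ((List.range sr.length).map (fun (j : Nat) => nl -
        (if (j : Int) < rem * (per + 1) then PySem.Int.floordiv (j : Int) (per + 1)
         else rem + PySem.Int.floordiv ((j : Int) - rem * (per + 1)) per))) := by
      have hdm : PySem.Int.divmod? ((sr.length : Int)) nl = some (per, rem) := by
        rw [hperdef, hremdef, htotdef]
        simp [PySem.Int.divmod?, hnl0, PySem.Int.floordiv, PySem.Int.mod]
      simp only [assign_levels_alt]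
      rw [if_neg htot0, hdm]
      dsimp only
      rw [pv_enum_zip sr (fun i => nl -
        (if i < rem * (per + 1) then PySem.Int.floordiv i (per + 1)
         else rem + PySem.Int.floordiv (i - rem * (per + 1)) per))]
      set lbs := (List.range sr.length).map (fun (j : Nat) => nl -
        (if (j : Int) < rem * (per + 1) then PySem.Int.floordiv (j : Int) (per + 1)
         else rem + PySem.Int.floordiv ((j : Int) - rem * (per + 1)) per)) with hlbsdef
      have hfresh : ∀ a ∈ keys.zip lbs,
          (PySem.Dict.empty : PySem.Dict String Int).contains a.1 = false :=
        fun a _ => PySem.Dict.contains_empty a.1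
      have hndz : ((keys.zip lbs).map Prod.fst).Nodup := by
        rw [List.map_fst_zip (show keys.length ≤ lbs.length by rw [hkeysdef, hlbsdef]; simp)]
        exact hnd
      show (PySem.Dict.ofList (keys.zip lbs)).items = keys.zip lbs
      unfold PySem.Dict.ofList PySem.Dict.update
      rw [PySem.Dict.items_foldl_insert_fresh (keys.zip lbs) Prod.fst Prod.snd
        PySem.Dict.empty hfresh hndz]
      simp [PySem.Dict.empty]
    rw [hA, hB, hG, hlab]
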